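-- pv_equiv track=rewrite | github.com/jaehyunan11/leetcode_Practice | pyramid_decent_puzzle.py | puzzleSolver
-- ===== SOURCE A (Python) =====
-- def puzzleSolver(puzzle, target):
--     # length of puzzle
--     n = len(puzzle)
--     # create queue
--     queue = []
--     # set first count
--     count = 1
--     # rows and colums start with (0,0)
--     rows = cols = 0
--     # Add first row, column, first num of puzzle, ''(empty string)
--     queue.append([rows, cols, puzzle[0][0], ''])
--
--     # loop queue until it is empty
--     while queue:
--         for i in range(len(queue)):
--             # remove first in queue and assign to curr
--             curr = queue.pop(0)
--             # if count is same as length of puzzle then check curr num is same as target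
--             # if same then return the path
--             if count == n:
--                 if curr[2] == target:
--                     return curr[3]
--             else:
--                 # Increase row index by 1 e.g. (1,0),(2,0)(3,0)
--                 next_row = curr[0] + 1
--                 next_col = curr[1]
--                 # Left path only if next_row is increased by 1 e.g. (+1, 0)
--                 # Multiply curr number in puzzle and new left side of num in puzzle
--                 queue.append([next_row, next_col, curr[2] *
--                               puzzle[next_row][next_col], curr[3] + 'L'])
--                 # Right path if both next_row & next_col are increased by 1 e.g. (+1, +1)
--                 # Multiply curr number in puzzle and new right side of num in puzzle
--                 queue.append([next_row, next_col + 1, curr[2]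
--                               * puzzle[next_row][next_col + 1], curr[3] + 'R'])
--         count += 1
--     # if there is no return val in while loop and exited then there is no valid path.
--     return 'There is no valid path'
-- ===== SOURCE B (Python) =====
-- def puzzleSolver(puzzle, target):
--     n = len(puzzle)
--
--     def dfs(row, col, prod, path):
--         # leaf row: this path's product is complete
--         if row == n - 1:
--             return path if prod == target else None
--         r = row + 1
--         left = dfs(r, col, prod * puzzle[r][col], path + 'L')
--         if left is not None:
--             return left
--         return dfs(r, col + 1, prod * puzzle[r][col + 1], path + 'R')
--
--     res = dfs(0, 0, puzzle[0][0], '')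
--     return res if res is not None else 'There is no valid path'
-- ===== Notes on version B (the rewrite author's own statement) =====
-- stated objective: alternative
-- what changed: Replaces the level-by-level BFS queue that materialises every partial path (popping from the front, appending two children per entry) with a left-first recursive DFS that returns the first matching leaf path early; it visits leaves in the same lexicographic L-before-R order, so the first hit is identical.
import Mathlib
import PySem

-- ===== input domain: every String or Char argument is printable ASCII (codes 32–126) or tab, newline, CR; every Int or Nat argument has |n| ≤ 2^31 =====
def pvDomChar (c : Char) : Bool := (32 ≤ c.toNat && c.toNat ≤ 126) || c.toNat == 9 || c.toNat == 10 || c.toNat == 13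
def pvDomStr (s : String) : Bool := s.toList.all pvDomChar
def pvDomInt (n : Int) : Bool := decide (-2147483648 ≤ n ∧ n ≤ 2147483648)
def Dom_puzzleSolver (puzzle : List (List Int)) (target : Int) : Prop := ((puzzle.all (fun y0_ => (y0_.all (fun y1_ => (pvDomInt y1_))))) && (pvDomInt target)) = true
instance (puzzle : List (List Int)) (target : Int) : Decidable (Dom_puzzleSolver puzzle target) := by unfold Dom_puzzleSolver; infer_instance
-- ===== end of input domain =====

-- ===== PORT A =====
-- B changes the level-by-level BFS queue into a left-first recursive DFS with early return.
-- A mutates only its local queue; no caller-visible side effects.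

-- the inner `for i in range(len(queue))` loop: k iterations, pop front, either test the
-- leaf (count == n) or append the two children; Sum.inl = Python's early `return curr[3]`
def pvAInner (puzzle : List (List Int)) (target n count : Int) :
    Nat → List (Int × Int × Int × String) → String ⊕ List (Int × Int × Int × String)
  | 0, q => Sum.inr q
  | _ + 1, [] => Sum.inr []   -- unreachable: k never exceeds the queue length (pop(0) would raise)
  | k + 1, (r, c, p, s) :: rest =>
    if count = n then
      if p = target then Sum.inl s
      else pvAInner puzzle target n count k rest
    else
      let nr := r + 1
      let nc := c
      pvAInner puzzle target n count k
        (rest ++ [(nr, nc, p * PySem.List.pyGetD (PySem.List.pyGetD puzzle nr []) nc 0, s ++ "L"),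
                  (nr, nc + 1, p * PySem.List.pyGetD (PySem.List.pyGetD puzzle nr []) (nc + 1) 0, s ++ "R")])

-- the `while queue:` loop; fuel bounds the iterations (inside Pre_ it runs exactly n times)
def pvAOuter (puzzle : List (List Int)) (target n : Int) :
    Nat → Int → List (Int × Int × Int × String) → String
  | 0, _, _ => "There is no valid path"
  | fuel + 1, count, q =>
    if q.isEmpty then "There is no valid path"
    else
      match pvAInner puzzle target n count q.length q with
      | Sum.inl s => s
      | Sum.inr q' => pvAOuter puzzle target n fuel (count + 1) q'

def puzzleSolver (puzzle : List (List Int)) (target : Int) : String :=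
  let n : Int := puzzle.length
  pvAOuter puzzle target n (puzzle.length + 1) 1
    [(0, 0, PySem.List.pyGetD (PySem.List.pyGetD puzzle 0 []) 0 0, "")]

-- ===== PORT B =====
-- dfs(row, col, prod, path); rem = (n-1) - row is the structural measure, so rem = 0
-- is exactly Python's `row == n - 1` leaf test
def pvDfs (puzzle : List (List Int)) (target : Int) :
    Nat → Int → Int → Int → String → Option String
  | 0, _, _, p, s => if p = target then some s else none
  | rem + 1, row, col, p, s =>
    let r := row + 1
    match pvDfs puzzle target rem r col (p * PySem.List.pyGetD (PySem.List.pyGetD puzzle r []) col 0) (s ++ "L") with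
    | some out => some out
    | none => pvDfs puzzle target rem r (col + 1) (p * PySem.List.pyGetD (PySem.List.pyGetD puzzle r []) (col + 1) 0) (s ++ "R")

def puzzleSolver_alt (puzzle : List (List Int)) (target : Int) : String :=
  let n := puzzle.length
  match pvDfs puzzle target (n - 1) 0 0 (PySem.List.pyGetD (PySem.List.pyGetD puzzle 0 []) 0 0) "" with
  | some res => res
  | none => "There is no valid path"

-- ===== PRECONDITION & SPEC =====
-- Pre_ excludes exactly the inputs where A raises IndexError: an empty puzzle, or a
-- pyramid row i shorter than i+1 entries (A reads puzzle[i][c] for every c ≤ i).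
def Pre_puzzleSolver (puzzle : List (List Int)) (target : Int) : Prop :=
  puzzle ≠ [] ∧ ∀ i < puzzle.length, i < (puzzle.getD i []).length
instance (puzzle : List (List Int)) (target : Int) : Decidable (Pre_puzzleSolver puzzle target) := by
  unfold Pre_puzzleSolver; infer_instance

def pvWitness_puzzleSolver : List (List Int) × Int := ([[2], [3, 4], [5, 6, 7]], 42)

def Spec_puzzleSolver (puzzle : List (List Int)) (target : Int) (out : String) : Prop := out = puzzleSolver_alt puzzle target
instance (puzzle : List (List Int)) (target : Int) (out : String) : Decidable (Spec_puzzleSolver puzzle target out) := by unfold Spec_puzzleSolver; infer_instance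

-- ===== CLAIM (what is proved, stated in full; the proofs are below) =====
def Claim_equal_puzzleSolver : Prop := ∀ (puzzle : List (List Int)) (target : Int), Dom_puzzleSolver puzzle target → Pre_puzzleSolver puzzle target → Spec_puzzleSolver puzzle target (puzzleSolver puzzle target)

-- ===== LEMMAS AND PROOFS =====

-- abbreviations for the proofs only
def pvChildren (puzzle : List (List Int)) (e : Int × Int × Int × String) :
    List (Int × Int × Int × String) :=
  [(e.1 + 1, e.2.1, e.2.2.1 * PySem.List.pyGetD (PySem.List.pyGetD puzzle (e.1 + 1) []) e.2.1 0, e.2.2.2 ++ "L"),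
   (e.1 + 1, e.2.1 + 1, e.2.2.1 * PySem.List.pyGetD (PySem.List.pyGetD puzzle (e.1 + 1) []) (e.2.1 + 1) 0, e.2.2.2 ++ "R")]

-- the leaf-level inner loop scans the queue and returns the first path whose product is target
theorem pvAInner_leaf (puzzle : List (List Int)) (target n : Int)
    (q : List (Int × Int × Int × String)) :
    pvAInner puzzle target n n q.length q =
      match q.findSome? (fun e => if e.2.2.1 = target then some e.2.2.2 else none) with
      | some s => Sum.inl s
      | none => Sum.inr [] := by
  induction q with
  | nil => simp [pvAInner]
  | cons e rest ih =>
    obtain ⟨r, c, p, s⟩ := e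
    simp only [List.length_cons, pvAInner, List.findSome?_cons]
    by_cases hp : p = target <;> simp [hp, ih]

-- a non-leaf inner loop replaces each of the q.length front entries by its two children at the back
theorem pvAInner_expand (puzzle : List (List Int)) (target n count : Int) (hcn : count ≠ n)
    (q acc : List (Int × Int × Int × String)) :
    pvAInner puzzle target n count q.length (q ++ acc) =
      Sum.inr (acc ++ q.flatMap (pvChildren puzzle)) := by
  induction q generalizing acc with
  | nil => simp [pvAInner]
  | cons e rest ih =>
    obtain ⟨r, c, p, s⟩ := e
    simp only [List.length_cons, List.cons_append, pvAInner, if_neg hcn]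
    rw [List.append_assoc] at *
    simpa [pvChildren, List.flatMap_cons] using ih (acc ++ pvChildren puzzle (r, c, p, s))

-- DFS from an entry with rem+1 levels left = left-first choice over the DFS of its children
theorem pvDfs_succ (puzzle : List (List Int)) (target : Int) (rem : Nat)
    (e : Int × Int × Int × String) :
    pvDfs puzzle target (rem + 1) e.1 e.2.1 e.2.2.1 e.2.2.2 =
      (pvChildren puzzle e).findSome? (fun f => pvDfs puzzle target rem f.1 f.2.1 f.2.2.1 f.2.2.2) := by
  obtain ⟨r, c, p, s⟩ := e
  simp only [pvDfs, pvChildren, List.findSome?_cons, List.findSome?_nil]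
  cases pvDfs puzzle target rem (r + 1) c (p * PySem.List.pyGetD (PySem.List.pyGetD puzzle (r + 1) []) c 0) (s ++ "L") <;>
    cases pvDfs puzzle target rem (r + 1) (c + 1) (p * PySem.List.pyGetD (PySem.List.pyGetD puzzle (r + 1) []) (c + 1) 0) (s ++ "R") <;> simp

-- the outer loop on an empty queue returns the sentinel whatever the fuel
theorem pvAOuter_nil (puzzle : List (List Int)) (target n : Int) (fuel : Nat) (count : Int) :
    pvAOuter puzzle target n fuel count [] = "There is no valid path" := by
  cases fuel <;> simp [pvAOuter]

theorem pvFindSome?_append {beta gamma : Type} (f : beta → Option gamma) (xs ys : List beta) :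
    (xs ++ ys).findSome? f =
      match xs.findSome? f with
      | some b => some b
      | none => ys.findSome? f := by
  induction xs with
  | nil => rfl
  | cons x t ih =>
    simp only [List.cons_append, List.findSome?_cons]
    cases f x <;> simp [ih]

theorem pvFindSome?_flatMap {alpha beta gamma : Type} (g : alpha → List beta) (f : beta → Option gamma)
    (h : alpha → Option gamma) (hh : ∀ a, h a = (g a).findSome? f) (l : List alpha) :
    (l.flatMap g).findSome? f = l.findSome? h := by
  induction l with
  | nil => rfl
  | cons a t ih =>
    rw [List.flatMap_cons, List.findSome?_cons, hh, pvFindSome?_append, ih]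
    cases (g a).findSome? f <;> rfl

-- main invariant: the BFS on a queue of entries d levels above the leaves returns the
-- first DFS hit among them (in queue order), else the sentinel
theorem pvOuter_eq_dfs (puzzle : List (List Int)) (target n : Int) (d fuel : Nat)
    (hfuel : d < fuel) :
    ∀ (count : Int), count = n - d →
    ∀ (q : List (Int × Int × Int × String)),
      pvAOuter puzzle target n fuel count q =
        match q.findSome? (fun e => pvDfs puzzle target d e.1 e.2.1 e.2.2.1 e.2.2.2) with
        | some s => s
        | none => "There is no valid path" := by
  induction d generalizing fuel with
  | zero =>
    intro count hc q
    obtain ⟨fuel, rfl⟩ : ∃ f, fuel = f + 1 := ⟨fuel - 1, by omega⟩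
    match q with
    | [] => simp [pvAOuter]
    | e :: rest =>
      have hcn : count = n := by omega
      simp only [pvAOuter, List.isEmpty_cons, Bool.false_eq_true, if_false]
      rw [hcn, pvAInner_leaf]
      have : (fun e : Int × Int × Int × String => pvDfs puzzle target 0 e.1 e.2.1 e.2.2.1 e.2.2.2)
           = (fun e => if e.2.2.1 = target then some e.2.2.2 else none) := by
        funext e; simp [pvDfs]
      rw [this]
      cases (e :: rest).findSome? (fun e : Int × Int × Int × String => if e.2.2.1 = target then some e.2.2.2 else none) with
      | none => simp [pvAOuter_nil]
      | some s => simp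
  | succ d ih =>
    intro count hc q
    obtain ⟨fuel, rfl⟩ : ∃ f, fuel = f + 1 := ⟨fuel - 1, by omega⟩
    match q with
    | [] => simp [pvAOuter]
    | e :: rest =>
      have hcn : count ≠ n := by omega
      simp only [pvAOuter, List.isEmpty_cons, Bool.false_eq_true, if_false]
      have hexp := pvAInner_expand puzzle target n count hcn (e :: rest) []
      simp only [List.append_nil, List.nil_append] at hexp
      rw [hexp]
      show pvAOuter puzzle target n fuel (count + 1) ((e :: rest).flatMap (pvChildren puzzle)) = _
      rw [ih fuel (by omega) (count + 1) (by omega) ((e :: rest).flatMap (pvChildren puzzle))]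
      have : ((e :: rest).flatMap (pvChildren puzzle)).findSome?
               (fun f => pvDfs puzzle target d f.1 f.2.1 f.2.2.1 f.2.2.2)
           = (e :: rest).findSome? (fun g => pvDfs puzzle target (d + 1) g.1 g.2.1 g.2.2.1 g.2.2.2) := by
        exact pvFindSome?_flatMap (pvChildren puzzle) _ _ (fun a => pvDfs_succ puzzle target d a) (e :: rest)
      rw [this]

-- ===== VERDICT (by name: the statement is the Claim_ definition above) =====
theorem puzzleSolver_spec : Claim_equal_puzzleSolver := by
  intro puzzle target _ hpre
  obtain ⟨hne, _⟩ := hpre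
  unfold Spec_puzzleSolver puzzleSolver puzzleSolver_alt
  have hn : 1 ≤ puzzle.length := List.length_pos_iff.mpr hne
  have h := pvOuter_eq_dfs puzzle target puzzle.length (puzzle.length - 1)
    (puzzle.length + 1) (by omega) 1 (by omega)
    [(0, 0, PySem.List.pyGetD (PySem.List.pyGetD puzzle 0 []) 0 0, "")]
  simp only [List.findSome?_cons, List.findSome?_nil] at h
  rw [h]
  cases hdfs : pvDfs puzzle target (puzzle.length - 1) 0 0 (PySem.List.pyGetD (PySem.List.pyGetD puzzle 0 []) 0 0) "" <;>
    simp [hdfs]
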